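-- pv_equiv track=rewrite | github.com/NewCavalry/MyFirstPythonProject | DiceGame_v2.py | isThreePairs
-- ===== SOURCE A (Python) =====
-- def isThreePairs(aList):
--     uniqueNumbersList = set(aList)
--     isThreePairsBoolean = True
--
--     for currentUniqueNumber in uniqueNumbersList:
--         if aList.count(currentUniqueNumber) !=2:
--             isThreePairsBoolean = False
--     if isThreePairsBoolean == True:
--         print ("-----------------------------------------------Great job! You got Three Pairs!")
--
--     return isThreePairsBoolean
-- ===== SOURCE B (Python) =====
-- def isThreePairs(aList):
--     s = sorted(aList)
--     ok = True
--     i = 0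
--     while i < len(s):
--         if i + 1 < len(s) and s[i] == s[i + 1] and (i + 2 >= len(s) or s[i + 2] != s[i]):
--             i += 2
--         else:
--             ok = False
--             break
--     if ok:
--         print ("-----------------------------------------------Great job! You got Three Pairs!")
--     return ok
-- ===== Notes on version B (the rewrite author's own statement) =====
-- stated objective: faster
-- what changed: Instead of building a set and rescanning the whole list with list.count for each distinct value (quadratic), B sorts a copy once and walks it in equal-value runs of length exactly 2.
import Mathlib
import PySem

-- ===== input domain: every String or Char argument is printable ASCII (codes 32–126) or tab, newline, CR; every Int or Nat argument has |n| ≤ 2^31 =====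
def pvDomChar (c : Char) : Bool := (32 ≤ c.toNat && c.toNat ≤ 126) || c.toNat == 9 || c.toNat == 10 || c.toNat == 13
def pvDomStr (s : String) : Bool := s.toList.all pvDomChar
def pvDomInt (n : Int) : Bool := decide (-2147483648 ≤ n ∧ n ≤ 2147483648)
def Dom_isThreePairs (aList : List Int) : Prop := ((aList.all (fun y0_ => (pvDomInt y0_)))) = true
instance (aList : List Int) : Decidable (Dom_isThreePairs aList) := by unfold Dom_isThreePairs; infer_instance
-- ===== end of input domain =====

-- B sorts a copy once and walks it in equal-value runs instead of A's per-distinct-value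
-- rescans with list.count; return value only is compared (both print the same line when True).

-- ===== PORT A =====
def isThreePairs (aList : List Int) : Bool :=
  let uniqueNumbersList := PySem.Set.ofList aList
  let isThreePairsBoolean :=
    uniqueNumbersList.foldl
      (fun b currentUniqueNumber =>
        if aList.count currentUniqueNumber ≠ 2 then false else b) true
  isThreePairsBoolean

-- ===== PORT B =====
-- the while loop of Source B over index i on the sorted copy, as recursion on the suffix s[i:]
def pairWalk : List Int → Bool
  | [] => true
  | [_] => false
  | x :: y :: rest =>
      (x == y && (match rest with | [] => true | z :: _ => z != x)) && pairWalk rest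

def isThreePairs_alt (aList : List Int) : Bool :=
  pairWalk (PySem.List.sorted aList (fun v => v) false)

-- ===== PRECONDITION & SPEC =====
def Spec_isThreePairs (aList : List Int) (out : Bool) : Prop := out = isThreePairs_alt aList
instance (aList : List Int) (out : Bool) : Decidable (Spec_isThreePairs aList out) := by unfold Spec_isThreePairs; infer_instance

-- ===== CLAIM (what is proved, stated in full; the proofs are below) =====
def Claim_equal_isThreePairs : Prop := ∀ (aList : List Int), Dom_isThreePairs aList → Spec_isThreePairs aList (isThreePairs aList)

-- ===== LEMMAS AND PROOFS =====

-- A's fold over the set is an 'all' over the set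
theorem foldA_eq (aList : List Int) (u : List Int) (init : Bool) :
    u.foldl (fun b x => if aList.count x ≠ 2 then false else b) init
      = (init && u.all (fun x => aList.count x == 2)) := by
  induction u generalizing init with
  | nil => simp
  | cons z zs ih =>
      simp only [List.foldl_cons, List.all_cons, ih]
      by_cases h : aList.count z = 2 <;> simp [h]

theorem isThreePairs_iff (aList : List Int) :
    isThreePairs aList = true ↔ ∀ x ∈ aList, aList.count x = 2 := by
  have hdef : isThreePairs aList
      = (PySem.Set.ofList aList).foldl
          (fun b x => if aList.count x ≠ 2 then false else b) true := rfl
  rw [hdef, foldA_eq]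
  simp [List.all_eq_true, PySem.Set.mem_ofList]

-- x below every element of a sorted nonempty list whose head differs from x is not in it
theorem not_mem_of_head_ne (x z : Int) (rs : List Int)
    (hle : ∀ w ∈ z :: rs, x ≤ w) (hp : (z :: rs).Pairwise (· ≤ ·)) (hz : z ≠ x) :
    x ∉ z :: rs := by
  intro hm
  rcases List.mem_cons.mp hm with h | h
  · exact hz h.symm
  · have h1 : x ≤ z := hle z (List.mem_cons_self ..)
    have h2 : z ≤ x := (List.pairwise_cons.mp hp).1 x h
    exact hz (le_antisymm h2 h1)

-- the guard s[i+2] != s[i] of Source B, as a match on the remaining suffix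
theorem not_mem_of_guard (x : Int) (rest : List Int)
    (hle : ∀ w ∈ rest, x ≤ w) (hp : rest.Pairwise (· ≤ ·))
    (hg : (match rest with | [] => true | z :: _ => z != x) = true) : x ∉ rest := by
  cases rest with
  | nil => simp
  | cons r rs =>
      simp only [bne_iff_ne, ne_eq] at hg
      exact not_mem_of_head_ne x r rs hle hp hg

-- on a sorted list, the pair walk decides "every value occurs exactly twice"
theorem pairWalk_iff : ∀ l : List Int, l.Pairwise (· ≤ ·) →
    (pairWalk l = true ↔ ∀ z ∈ l, l.count z = 2) := by
  intro l
  induction l using pairWalk.induct with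
  | case1 => intro _; simp [pairWalk]
  | case2 x => intro _; simp [pairWalk]
  | case3 x y rest ih =>
    intro hp
    have hxy2 : ∀ w ∈ y :: rest, x ≤ w := (List.pairwise_cons.mp hp).1
    have hp1 : (y :: rest).Pairwise (· ≤ ·) := (List.pairwise_cons.mp hp).2
    have hprest : rest.Pairwise (· ≤ ·) := (List.pairwise_cons.mp hp1).2
    have hxrest : ∀ w ∈ rest, x ≤ w := fun w hw => hxy2 w (List.mem_cons_of_mem _ hw)
    have hyrest : ∀ w ∈ rest, y ≤ w := (List.pairwise_cons.mp hp1).1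
    constructor
    · intro h z hz
      simp only [pairWalk, Bool.and_eq_true, beq_iff_eq] at h
      obtain ⟨⟨hxy, hguard⟩, hrec⟩ := h
      subst hxy
      have hxnot : x ∉ rest := not_mem_of_guard x rest hxrest hprest hguard
      have hrc := (ih hprest).mp hrec
      have hc0 : rest.count x = 0 := List.count_eq_zero.mpr hxnot
      rcases List.mem_cons.mp hz with h1 | h1
      · subst h1
        simp [hc0]
      rcases List.mem_cons.mp h1 with h2 | h2
      · subst h2
        simp [hc0]
      · have hzx : z ≠ x := fun he => hxnot (he ▸ h2)
        have hrw : (x :: x :: rest).count z = rest.count z := by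
          simp [hzx.symm]
        rw [hrw]
        exact hrc z h2
    · intro h
      have hxy : x = y := by
        by_contra hne
        have hxlt : x < y := lt_of_le_of_ne (hxy2 y (List.mem_cons_self ..)) hne
        have hcx := h x (List.mem_cons_self ..)
        have hx0 : rest.count x = 0 := by
          apply List.count_eq_zero.mpr
          intro hm
          exact absurd (hyrest x hm) (not_le.mpr hxlt)
        rw [List.count_cons, List.count_cons, hx0] at hcx
        simp [Ne.symm hne] at hcx
      subst hxy
      have hcx := h x (List.mem_cons_self ..)
      have hx0 : rest.count x = 0 := by
        rw [List.count_cons, List.count_cons] at hcx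
        simp at hcx
        omega
      have hxnot : x ∉ rest := List.count_eq_zero.mp hx0
      have hrec : pairWalk rest = true := by
        apply (ih hprest).mpr
        intro z hz
        have hzx : z ≠ x := fun he => hxnot (he ▸ hz)
        have hfull := h z (List.mem_cons_of_mem _ (List.mem_cons_of_mem _ hz))
        rw [List.count_cons, List.count_cons] at hfull
        simpa [hzx.symm] using hfull
      simp only [pairWalk, Bool.and_eq_true]
      refine ⟨⟨by simp, ?_⟩, hrec⟩
      clear ih hprest hxrest hp hxy2 hp1 hyrest h hcx hx0 hrec
      cases rest with
      | nil => rfl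
      | cons r rs =>
          simp only [bne_iff_ne, ne_eq]
          intro he
          exact hxnot (he ▸ List.mem_cons_self ..)

theorem isThreePairs_alt_iff (aList : List Int) :
    isThreePairs_alt aList = true ↔ ∀ x ∈ aList, aList.count x = 2 := by
  unfold isThreePairs_alt
  have hperm := PySem.List.sorted_perm aList (fun v => v) false
  rw [pairWalk_iff _ (by simpa using PySem.List.sorted_pairwise aList (fun v => v))]
  constructor
  · intro h x hx
    have := h x (hperm.mem_iff.mpr hx)
    rwa [hperm.count_eq] at this
  · intro h x hx
    rw [hperm.count_eq]
    exact h x (hperm.mem_iff.mp hx)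

-- ===== VERDICT (by name: the statement is the Claim_ definition above) =====
theorem isThreePairs_spec : Claim_equal_isThreePairs := by
  intro aList _
  unfold Spec_isThreePairs
  have := (isThreePairs_iff aList).trans (isThreePairs_alt_iff aList).symm
  exact Bool.coe_iff_coe.mp this
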